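-- pv_equiv track=rewrite | github.com/Vajra-Chaitanya/Dual_Mind_Final | verifier.py | _check_redundancy
-- ===== SOURCE A (Python) =====
-- from typing import Dict, Any, List, Tuple
--
-- def _check_redundancy(pipeline: List[Dict[str, Any]]) -> bool:
--     """Check for redundant tool usage."""
--     tools_used = []
--     for step in pipeline:
--         tool = step.get("tool", "")
--         if tool in tools_used:
--             return True
--         tools_used.append(tool)
--     return False
-- ===== SOURCE B (Python) =====
-- from typing import Dict, Any, List
--
-- def _check_redundancy(pipeline: List[Dict[str, Any]]) -> bool:
--     """Check for redundant tool usage."""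
--     tools = [step.get("tool", "") for step in pipeline]
--     return len(tools) != len(set(tools))
-- ===== Notes on version B (the rewrite author's own statement) =====
-- stated objective: simpler
-- what changed: Replaces the incremental membership-check-with-early-return loop by a two-phase build-all-then-compare: collect every step's tool with one comprehension and compare the list's length with its set's cardinality.
import Mathlib
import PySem

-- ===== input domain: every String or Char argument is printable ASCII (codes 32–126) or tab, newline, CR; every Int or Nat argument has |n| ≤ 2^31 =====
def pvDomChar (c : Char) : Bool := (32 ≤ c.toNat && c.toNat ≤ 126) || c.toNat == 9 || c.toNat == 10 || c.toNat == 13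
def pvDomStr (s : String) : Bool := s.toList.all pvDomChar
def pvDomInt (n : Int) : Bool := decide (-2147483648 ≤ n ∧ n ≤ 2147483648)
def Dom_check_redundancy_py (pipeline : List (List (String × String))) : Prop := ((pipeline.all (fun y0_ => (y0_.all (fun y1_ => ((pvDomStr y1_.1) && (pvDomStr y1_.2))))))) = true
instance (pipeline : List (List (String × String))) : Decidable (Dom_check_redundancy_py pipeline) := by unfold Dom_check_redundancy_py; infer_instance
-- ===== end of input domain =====

-- B replaces A's per-step membership check with build-all-then-compare-cardinalities; objective: simpler.

-- ===== PORT A =====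
-- the 'for step in pipeline' loop with its 'tools_used' accumulator and early return
def checkRedundancyLoopA (rest : List (List (String × String))) (tools_used : List String) : Bool :=
  match rest with
  | [] => false
  | step :: rest' =>
    let tool := (PySem.Dict.mk step).getD "tool" ""
    if tools_used.contains tool then true
    else checkRedundancyLoopA rest' (tools_used ++ [tool])

def check_redundancy_py (pipeline : List (List (String × String))) : Bool :=
  checkRedundancyLoopA pipeline []

-- ===== PORT B =====
def check_redundancy_py_alt (pipeline : List (List (String × String))) : Bool :=
  let tools := pipeline.map (fun step => (PySem.Dict.mk step).getD "tool" "")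
  tools.length != (PySem.Set.ofList tools).length

-- ===== PRECONDITION & SPEC =====
def Spec_check_redundancy_py (pipeline : List (List (String × String))) (out : Bool) : Prop := out = check_redundancy_py_alt pipeline
instance (pipeline : List (List (String × String))) (out : Bool) : Decidable (Spec_check_redundancy_py pipeline out) := by unfold Spec_check_redundancy_py; infer_instance

-- ===== CLAIM (what is proved, stated in full; the proofs are below) =====
def Claim_equal_check_redundancy_py : Prop := ∀ (pipeline : List (List (String × String))), Dom_check_redundancy_py pipeline → Spec_check_redundancy_py pipeline (check_redundancy_py pipeline)

-- ===== LEMMAS AND PROOFS =====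

-- the set's cardinality equals the list's length exactly when the list has no duplicates
lemma length_ofList_eq_iff_nodup (l : List String) :
    ((PySem.Set.ofList l).length = l.length) ↔ l.Nodup := by
  induction l using List.reverseRecOn with
  | nil => simp [PySem.Set.ofList_nil]
  | append_singleton xs x ih =>
    rw [PySem.Set.ofList_append_singleton]
    by_cases hx : x ∈ xs
    · have hc : PySem.Set.add (PySem.Set.ofList xs) x = PySem.Set.ofList xs := by
        simp [PySem.Set.add, PySem.Set.contains, PySem.Set.mem_ofList, hx]
      rw [hc]
      apply iff_of_false
      · have hle := PySem.Set.length_ofList_le (xs := xs)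
        simp only [List.length_append, List.length_cons, List.length_nil]
        omega
      · intro h
        exact (List.nodup_append.mp h).2.2 x hx x (by simp) rfl
    · have hc : PySem.Set.add (PySem.Set.ofList xs) x = PySem.Set.ofList xs ++ [x] := by
        simp [PySem.Set.add, PySem.Set.contains]
        intro h
        exact absurd ((PySem.Set.mem_ofList _ _).mp (by simpa using h)) hx
      rw [hc]
      simp only [List.length_append, List.length_cons, List.length_nil, List.nodup_append,
        List.nodup_singleton, true_and]
      constructor
      · intro h
        refine ⟨ih.mp (by omega), ?_⟩
        intro a ha b hb
        simp only [List.mem_singleton] at hb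
        subst hb
        exact fun h => hx (h ▸ ha)
      · intro ⟨h1, _⟩
        have := ih.mpr h1; omega

-- A's loop returns true exactly when (seen ++ remaining tools) contains a duplicate
lemma loopA_eq (rest : List (List (String × String))) :
    ∀ seen : List String, seen.Nodup →
      checkRedundancyLoopA rest seen
        = !decide (seen ++ rest.map (fun step => (PySem.Dict.mk step).getD "tool" "")).Nodup := by
  induction rest with
  | nil => intro seen hs; simp [checkRedundancyLoopA, hs]
  | cons step rest' ih =>
    intro seen hs
    simp only [checkRedundancyLoopA, List.map_cons]
    by_cases hmem : ((PySem.Dict.mk step).getD "tool" "") ∈ seen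
    · rw [if_pos (by simpa using hmem)]
      have hdup : ¬ (seen ++ ((PySem.Dict.mk step).getD "tool" "") :: rest'.map (fun s => (PySem.Dict.mk s).getD "tool" "")).Nodup := by
        intro h
        exact (List.nodup_append.mp h).2.2 _ hmem _ (by simp) rfl
      simp [hdup]
    · rw [if_neg (by simpa using hmem)]
      have hs' : (seen ++ [(PySem.Dict.mk step).getD "tool" ""]).Nodup := by
        simp only [List.nodup_append, List.nodup_singleton, true_and]
        refine ⟨hs, ?_⟩
        intro a ha b hb
        simp only [List.mem_singleton] at hb
        subst hb
        exact fun h => hmem (h ▸ ha)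
      rw [ih _ hs']
      congr 2
      simp

-- ===== VERDICT (by name: the statement is the Claim_ definition above) =====
theorem check_redundancy_py_spec : Claim_equal_check_redundancy_py := by
  intro pipeline _
  unfold Spec_check_redundancy_py check_redundancy_py check_redundancy_py_alt
  rw [loopA_eq pipeline [] List.nodup_nil]
  simp only [List.nil_append]
  set tools := pipeline.map (fun step => (PySem.Dict.mk step).getD "tool" "") with htools
  by_cases h : tools.Nodup
  · simp [h, bne, (length_ofList_eq_iff_nodup tools).mpr h]
  · have hne : (PySem.Set.ofList tools).length ≠ tools.length := fun he =>
      h ((length_ofList_eq_iff_nodup tools).mp he)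
    simp [h, bne, Ne.symm hne]
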